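-- pv_equiv track=rewrite | github.com/FireF4ng/Inf101_Project_-Le-Scrabble | i11_Daniel_Nikolai_projet.py | meilleur_mot
-- ===== SOURCE A (Python) =====
-- JOKER = '?'  # jeton joker
--
-- def mot_jouable(mot, ll):
--     """Q15) Vérifie si le mot peut être formé avec les lettres de la liste ll."""
--
--     liste_temp = list(ll)
--     for lettre in mot:
--
--         if lettre in liste_temp:
--             liste_temp.remove(lettre)
--
--         elif JOKER in liste_temp:
--             liste_temp.remove(JOKER)
--
--         else:
--             return False
--
--     return True
--
-- def mots_jouables(motsfr, ll):
--     """Q16) Sélectionne les mots de motsfr pouvant être formés avec les lettres de la liste ll."""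
--
--     pool = list(ll)
--     playable = []
--
--     max_len = len(pool)
--
--     for mot in motsfr:
--
--         if len(mot) <= max_len:
--
--             if mot_jouable(mot, pool):
--                 playable.append(mot)
--
--     return playable
--
-- def valeur_mot(mot, dico):
--     """Q22) Calcule la valeur du mot selon le dictionnaire dico."""
--
--     valeur = 0
--
--     # Calcul du score
--     for lettre in mot:
--         if lettre in dico:
--             valeur += dico[lettre]['val']
--
--     if len(mot) == 7:
--         valeur += 50
--
--     return valeur
--
-- def meilleur_mot(motsfr, ll, dico):
--     """Q23) Trouve le mot de plus haute valeur jouable avec les lettres de la liste ll."""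
--
--     candidats = mots_jouables(motsfr, ll)
--
--     if not candidats:
--         return ""
--
--     best = candidats[0]
--     best_score = valeur_mot(best, dico)
--
--     # Parcours des candidats pour trouver le meilleur mot
--     for mot in candidats[1:]:
--         s = valeur_mot(mot, dico)
--
--         if s > best_score:
--             best = mot
--             best_score = s
--
--     return best
-- ===== SOURCE B (Python) =====
-- JOKER = '?'
--
--
-- def meilleur_mot(motsfr, ll, dico):
--     """Single pass over motsfr with a count-based (multiset) playability test;
--     keeps the running best word/score instead of building a candidate list."""
--
--     # multiset of the rack
--     rack = {}
--     for t in ll: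
--         rack[t] = rack.get(t, 0) + 1
--     jokers = rack.get(JOKER, 0)
--     n = len(ll)
--
--     best = None
--     best_score = 0
--
--     for mot in motsfr:
--         if len(mot) > n:
--             continue
--
--         # playability: every '?' letter needs a '?' tile, every shortfall of a
--         # plain letter consumes one '?' tile; playable iff the '?' tiles cover it
--         need = {}
--         for c in mot:
--             need[c] = need.get(c, 0) + 1
--         deficit = need.get(JOKER, 0)
--         for c, k in need.items():
--             if c != JOKER:
--                 short = k - rack.get(c, 0)
--                 if short > 0:
--                     deficit += short
--         if deficit > jokers:
--             continue
--
--         # score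
--         s = 50 if len(mot) == 7 else 0
--         for c in mot:
--             if c in dico:
--                 s += dico[c]['val']
--
--         if best is None or s > best_score:
--             best, best_score = mot, s
--
--     return best if best is not None else ""
-- ===== Notes on version B (the rewrite author's own statement) =====
-- stated objective: faster
-- what changed: Fuses filter-then-scan into one pass that keeps the running best (first playable word wins ties via strict >), and replaces the greedy remove-from-a-rack-copy playability simulation by a count/multiset test (deficit of each letter covered by joker tiles).
-- outside the precondition, e.g. on meilleur_mot(['ab'], ['a', 'c'], {'a': {}}): A returns '', B returns ''
import Mathlib
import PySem

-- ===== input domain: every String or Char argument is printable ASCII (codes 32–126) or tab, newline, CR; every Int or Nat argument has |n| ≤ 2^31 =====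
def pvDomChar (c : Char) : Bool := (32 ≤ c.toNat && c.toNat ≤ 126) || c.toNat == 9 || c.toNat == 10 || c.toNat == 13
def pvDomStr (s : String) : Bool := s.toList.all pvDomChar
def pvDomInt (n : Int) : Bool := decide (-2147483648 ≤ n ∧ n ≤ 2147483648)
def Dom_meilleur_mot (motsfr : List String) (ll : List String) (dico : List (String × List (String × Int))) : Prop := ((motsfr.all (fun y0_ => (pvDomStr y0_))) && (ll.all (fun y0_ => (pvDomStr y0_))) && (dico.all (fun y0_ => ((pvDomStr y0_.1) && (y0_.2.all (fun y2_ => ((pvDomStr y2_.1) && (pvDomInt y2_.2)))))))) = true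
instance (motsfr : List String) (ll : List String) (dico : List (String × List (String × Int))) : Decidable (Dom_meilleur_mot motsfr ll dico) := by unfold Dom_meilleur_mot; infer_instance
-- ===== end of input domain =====

-- B fuses A's filter-then-scan into one best-so-far pass and replaces the greedy
-- remove-from-a-rack-copy playability test by a count/multiset deficit test; same results.

-- ===== PORT A =====
def pvMotJouableGo : List Char → List String → Bool
  | [], _ => true
  | c :: rest, temp =>
    let s := String.singleton c
    if temp.contains s then
      pvMotJouableGo rest ((PySem.List.remove? temp s).getD temp)
    else if temp.contains "?" then
      pvMotJouableGo rest ((PySem.List.remove? temp "?").getD temp)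
    else false

def mot_jouable (mot : String) (ll : List String) : Bool :=
  pvMotJouableGo mot.toList ll

def mots_jouables (motsfr : List String) (ll : List String) : List String :=
  motsfr.foldl (fun playable mot =>
    if mot.toList.length ≤ ll.length then
      if mot_jouable mot ll then playable ++ [mot] else playable
    else playable) []

-- dico[lettre]['val'] with 'val' absent raises KeyError in Python; such inputs are outside Pre_
def valeur_mot (mot : String) (dico : List (String × List (String × Int))) : Int :=
  let d := PySem.Dict.ofList dico
  let valeur := mot.toList.foldl (fun valeur c =>
    match d.get? (String.singleton c) with
    | some inner => valeur + (PySem.Dict.ofList inner).getD "val" 0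
    | none => valeur) 0
  if mot.toList.length = 7 then valeur + 50 else valeur

def meilleur_mot (motsfr : List String) (ll : List String) (dico : List (String × List (String × Int))) : String :=
  match mots_jouables motsfr ll with
  | [] => ""
  | b0 :: rest =>
    (rest.foldl (fun (st : String × Int) mot =>
      let s := valeur_mot mot dico
      if s > st.2 then (mot, s) else st) (b0, valeur_mot b0 dico)).1

-- ===== PORT B =====
def pvRackOf (ll : List String) : PySem.Dict String Int :=
  ll.foldl (fun rack t => rack.insert t (rack.getD t 0 + 1)) PySem.Dict.empty

def pvNeedOf (cs : List Char) : PySem.Dict String Int :=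
  cs.foldl (fun need c =>
    need.insert (String.singleton c) (need.getD (String.singleton c) 0 + 1)) PySem.Dict.empty

def pvDeficit (need rack : PySem.Dict String Int) : Int :=
  need.items.foldl (fun deficit ck =>
    if ck.1 ≠ "?" then
      let short := ck.2 - rack.getD ck.1 0
      if short > 0 then deficit + short else deficit
    else deficit) (need.getD "?" 0)

-- same per-letter scoring as Python B (missing 'val' is outside Pre_, as for A)
def pvScore (mot : String) (dico : List (String × List (String × Int))) : Int :=
  let s0 : Int := if mot.toList.length = 7 then 50 else 0
  mot.toList.foldl (fun s c =>
    match (PySem.Dict.ofList dico).get? (String.singleton c) with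
    | some inner => s + (PySem.Dict.ofList inner).getD "val" 0
    | none => s) s0

def meilleur_mot_alt (motsfr : List String) (ll : List String) (dico : List (String × List (String × Int))) : String :=
  let rack := pvRackOf ll
  let jokers := rack.getD "?" 0
  let n := ll.length
  let st := motsfr.foldl (fun (st : Option String × Int) mot =>
    if mot.toList.length > n then st
    else if pvDeficit (pvNeedOf mot.toList) rack > jokers then st
    else
      let s := pvScore mot dico
      match st.1 with
      | none => (some mot, s)
      | some _ => if s > st.2 then (some mot, s) else st) ((none : Option String), (0 : Int))
  match st.1 with
  | none => ""
  | some b => b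

-- ===== PRECONDITION & SPEC =====
-- Pre_ excludes dicos in which some single-letter key, occurring in a word of motsfr that fits the
-- rack length, maps to an inner dict without the key "val": when such a word is playable both Python
-- programs raise KeyError there; the condition omits the (algorithmic) playability test, so a few
-- non-playable cases where A still returns "" are excluded too (see cites).
def Pre_meilleur_mot (motsfr : List String) (ll : List String) (dico : List (String × List (String × Int))) : Prop :=
  ∀ p ∈ dico,
    (∃ mot ∈ motsfr, mot.toList.length ≤ ll.length ∧ p.1 ∈ mot.toList.map String.singleton) →
    (PySem.Dict.ofList p.2).contains "val" = true
instance (motsfr : List String) (ll : List String) (dico : List (String × List (String × Int))) : Decidable (Pre_meilleur_mot motsfr ll dico) := by unfold Pre_meilleur_mot; infer_instance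

def pvWitness_meilleur_mot : List String × List String × (List (String × List (String × Int))) :=
  (["ab", "a"], ["a", "b"], [("a", [("val", 1)])])

def Spec_meilleur_mot (motsfr : List String) (ll : List String) (dico : List (String × List (String × Int))) (out : String) : Prop := out = meilleur_mot_alt motsfr ll dico
instance (motsfr : List String) (ll : List String) (dico : List (String × List (String × Int))) (out : String) : Decidable (Spec_meilleur_mot motsfr ll dico out) := by unfold Spec_meilleur_mot; infer_instance

-- ===== CLAIM (what is proved, stated in full; the proofs are below) =====
def Claim_equal_meilleur_mot : Prop := ∀ (motsfr : List String) (ll : List String) (dico : List (String × List (String × Int))), Dom_meilleur_mot motsfr ll dico → Pre_meilleur_mot motsfr ll dico → Spec_meilleur_mot motsfr ll dico (meilleur_mot motsfr ll dico)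

-- ===== LEMMAS AND PROOFS =====

-- greedy playability restated over the word's letters as 1-char strings
def pvGdy : List String → List String → Bool
  | [], _ => true
  | s :: rest, temp =>
    if temp.contains s then pvGdy rest ((PySem.List.remove? temp s).getD temp)
    else if temp.contains "?" then pvGdy rest ((PySem.List.remove? temp "?").getD temp)
    else false

lemma pvGo_eq_gdy : ∀ (cs : List Char) (temp : List String),
    pvMotJouableGo cs temp = pvGdy (cs.map String.singleton) temp := by
  intro cs
  induction cs with
  | nil => intro temp; rfl
  | cons c rest ih =>
    intro temp
    simp only [pvMotJouableGo, pvGdy, List.map]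
    split_ifs <;> simp [ih]

-- per-letter joker deficit (Int, truncated at 0), the quantity B sums
def pvG (ws temp : List String) (s : String) : Int :=
  if s = "?" then 0
  else if (ws.count s : Int) - (temp.count s : Int) > 0 then (ws.count s : Int) - (temp.count s : Int) else 0

lemma pvG_nonneg (ws temp : List String) (s : String) : 0 ≤ pvG ws temp s := by
  unfold pvG; split_ifs <;> omega

lemma pvSum_nonneg (U ws temp : List String) : 0 ≤ (U.map (pvG ws temp)).sum := by
  apply List.sum_nonneg
  intro x hx
  simp only [List.mem_map] at hx
  obtain ⟨s, _, rfl⟩ := hx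
  exact pvG_nonneg ws temp s

lemma pvSum_split {U : List String} {s : String} (hs : s ∈ U) (ws temp : List String) :
    (U.map (pvG ws temp)).sum = pvG ws temp s + ((U.erase s).map (pvG ws temp)).sum := by
  have hperm : U.Perm (s :: U.erase s) := List.perm_cons_erase hs
  have := (hperm.map (pvG ws temp)).sum_eq
  simpa using this

-- the key invariant: greedy playability ⇔ total joker deficit within joker supply
lemma pvGdy_iff : ∀ (ws temp U : List String), U.Nodup → (∀ s ∈ ws, s ≠ "?" → s ∈ U) →
    (pvGdy ws temp = true ↔
      ((ws.count "?" : Int) + (U.map (pvG ws temp)).sum ≤ (temp.count "?" : Int))) := by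
  intro ws
  induction ws with
  | nil =>
    intro temp U hU hcov
    have hsum : (U.map (pvG [] temp)).sum = 0 := by
      have : ∀ x ∈ U, pvG [] temp x = 0 := by
        intro x _; unfold pvG; split_ifs <;> simp_all <;> omega
      rw [List.map_congr_left this]; simp
    simp [pvGdy, hsum]
  | cons s rest ih =>
    intro temp U hU hcov
    have hcov' : ∀ x ∈ rest, x ≠ "?" → x ∈ U := fun x hx => hcov x (List.mem_cons_of_mem _ hx)
    by_cases hmem : s ∈ temp
    · have hc : temp.contains s = true := by simpa using hmem
      have hrem : (PySem.List.remove? temp s).getD temp = temp.erase s := by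
        rw [PySem.List.remove?_eq_some_erase temp s hmem]; rfl
      simp only [pvGdy, hc, if_true, hrem]
      by_cases hq : s = "?"
      · subst hq
        rw [ih (temp.erase "?") U hU hcov']
        have h3 : (U.map (pvG ("?" :: rest) temp)).sum = (U.map (pvG rest (temp.erase "?"))).sum := by
          apply congrArg
          apply List.map_congr_left
          intro x _
          unfold pvG
          by_cases hx : x = "?"
          · simp [hx]
          · have c1 : ("?" :: rest).count x = rest.count x := List.count_cons_of_ne (fun h => hx h.symm)
            have c2 : (temp.erase "?").count x = temp.count x := List.count_erase_of_ne hx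
            simp [hx, c1, c2]
        rw [h3]
        have h1 : (("?" :: rest).count "?") = rest.count "?" + 1 := by simp
        have h2 : temp.count "?" = (temp.erase "?").count "?" + 1 := by
          rw [List.count_erase_self]
          have : 1 ≤ temp.count "?" := List.one_le_count_iff.mpr hmem
          omega
        rw [h1, h2]
        push_cast
        constructor <;> intro h <;> omega
      · rw [ih (temp.erase s) U hU hcov']
        have h1 : (s :: rest).count "?" = rest.count "?" := List.count_cons_of_ne hq
        have h2 : (temp.erase s).count "?" = temp.count "?" :=
          List.count_erase_of_ne (fun h => hq h.symm)
        have h3 : (U.map (pvG (s :: rest) temp)).sum = (U.map (pvG rest (temp.erase s))).sum := by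
          apply congrArg
          apply List.map_congr_left
          intro x _
          unfold pvG
          by_cases hx : x = "?"
          · simp [hx]
          · by_cases hxs : x = s
            · subst hxs
              have c1 : (x :: rest).count x = rest.count x + 1 := by simp
              have c2 : (temp.erase x).count x = temp.count x - 1 := List.count_erase_self
              have hc1 : 1 ≤ temp.count x := List.one_le_count_iff.mpr hmem
              simp only [hx, if_false, c1, c2]
              have heq : ((rest.count x + 1 : Nat) : Int) - ((temp.count x : Nat) : Int)
                   = ((rest.count x : Nat) : Int) - (((temp.count x - 1 : Nat)) : Int) := by
                push_cast [hc1]; omega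
              rw [heq]
            · have c1 : (s :: rest).count x = rest.count x := List.count_cons_of_ne (fun h => hxs h.symm)
              have c2 : (temp.erase s).count x = temp.count x := List.count_erase_of_ne hxs
              simp [hx, c1, c2]
        rw [h3, h1, h2]
    · have hc : temp.contains s = false := by simpa using hmem
      have hsU : s ≠ "?" → s ∈ U := fun h => hcov s (List.mem_cons_self) h
      have hts : temp.count s = 0 := by
        simpa using List.count_eq_zero.mpr hmem
      by_cases hj : "?" ∈ temp
      · have hcj : temp.contains "?" = true := by simpa using hj
        have hq : s ≠ "?" := fun h => hmem (h ▸ hj)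
        have hrem : (PySem.List.remove? temp "?").getD temp = temp.erase "?" := by
          rw [PySem.List.remove?_eq_some_erase temp "?" hj]; rfl
        simp only [pvGdy, hc, if_false, Bool.false_eq_true, hcj, if_true, hrem]
        rw [ih (temp.erase "?") U hU hcov']
        have h1 : (s :: rest).count "?" = rest.count "?" := List.count_cons_of_ne hq
        have h2 : temp.count "?" = (temp.erase "?").count "?" + 1 := by
          rw [List.count_erase_self]
          have : 1 ≤ temp.count "?" := List.one_le_count_iff.mpr hj
          omega
        have hsU' := hsU hq
        have e1 : (U.map (pvG (s :: rest) temp)).sum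
            = pvG (s :: rest) temp s + ((U.erase s).map (pvG (s :: rest) temp)).sum :=
          pvSum_split hsU' _ _
        have e2 : (U.map (pvG rest (temp.erase "?"))).sum
            = pvG rest (temp.erase "?") s + ((U.erase s).map (pvG rest (temp.erase "?"))).sum :=
          pvSum_split hsU' _ _
        have c1 : (s :: rest).count s = rest.count s + 1 := by simp
        have hterm1 : pvG (s :: rest) temp s = (rest.count s : Int) + 1 := by
          unfold pvG
          rw [if_neg hq, c1, hts]
          split_ifs <;> push_cast <;> omega
        have c2 : (temp.erase "?").count s = temp.count s := List.count_erase_of_ne hq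
        have hterm2 : pvG rest (temp.erase "?") s = (rest.count s : Int) := by
          unfold pvG
          rw [if_neg hq, c2, hts]
          split_ifs <;> push_cast <;> omega
        have htails : ((U.erase s).map (pvG (s :: rest) temp)).sum
            = ((U.erase s).map (pvG rest (temp.erase "?"))).sum := by
          apply congrArg
          apply List.map_congr_left
          intro x hx
          have hxs : x ≠ s := by
            intro h; subst h
            exact (hU.not_mem_erase) hx
          unfold pvG
          by_cases hxq : x = "?"
          · simp [hxq]
          · have d1 : (s :: rest).count x = rest.count x := List.count_cons_of_ne (fun h => hxs h.symm)
            have d2 : (temp.erase "?").count x = temp.count x := List.count_erase_of_ne hxq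
            simp [hxq, d1, d2]
        rw [e1, e2, hterm1, hterm2, htails, h1, h2]
        push_cast
        constructor <;> intro h <;> omega
      · have hcj : temp.contains "?" = false := by simpa using hj
        simp only [pvGdy, hc, hcj, if_false, Bool.false_eq_true, false_iff]
        have hjc : temp.count "?" = 0 := List.count_eq_zero.mpr hj
        rw [hjc]
        by_cases hq : s = "?"
        · subst hq
          have h1 : (1 : Int) ≤ (("?" :: rest).count "?" : Int) := by
            have : 1 ≤ ("?" :: rest).count "?" := by simp
            exact_mod_cast this
          have h2 := pvSum_nonneg U ("?" :: rest) temp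
          intro h
          omega
        · have hsU' := hsU hq
          have e1 := pvSum_split hsU' (s :: rest) temp
          have c1 : (s :: rest).count s = rest.count s + 1 := by simp
          have hterm1 : pvG (s :: rest) temp s = (rest.count s : Int) + 1 := by
            unfold pvG
            rw [if_neg hq, c1, hts]
            split_ifs <;> push_cast <;> omega
          have htail := pvSum_nonneg (U.erase s) (s :: rest) temp
          have hcnt : (0 : Int) ≤ ((s :: rest).count "?" : Int) := by positivity
          intro h
          rw [e1, hterm1] at h
          omega

-- characterization of B's deficit against the count formula
lemma pvRackOf_eq (ll : List String) : pvRackOf ll = PySem.Dict.counter ll := by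
  unfold pvRackOf
  exact PySem.Dict.foldl_insert_getD_add_one_eq_counter ll

lemma pvNeedOf_eq (cs : List Char) :
    pvNeedOf cs = PySem.Dict.counter (cs.map String.singleton) := by
  unfold pvNeedOf
  rw [← PySem.Dict.foldl_insert_getD_add_one_eq_counter, List.foldl_map]

lemma pvDeficit_eq (cs : List Char) (ll : List String) :
    pvDeficit (pvNeedOf cs) (pvRackOf ll)
      = ((cs.map String.singleton).count "?" : Int)
        + ((PySem.Set.ofList (cs.map String.singleton)).map (pvG (cs.map String.singleton) ll)).sum := by
  unfold pvDeficit
  rw [pvNeedOf_eq, pvRackOf_eq, PySem.Dict.items_counter, PySem.Dict.getD_counter]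
  rw [List.foldl_map]
  have hstep : (fun (deficit : Int) (k : String) =>
      if ((fun k => (k, ((cs.map String.singleton).count k : Int))) k).1 ≠ "?" then
        let short := ((fun k => (k, ((cs.map String.singleton).count k : Int))) k).2
          - (PySem.Dict.counter ll).getD ((fun k => (k, ((cs.map String.singleton).count k : Int))) k).1 0
        if short > 0 then deficit + short else deficit
      else deficit)
      = fun (deficit : Int) (k : String) => deficit + pvG (cs.map String.singleton) ll k := by
    funext deficit k
    simp only [PySem.Dict.getD_counter]
    unfold pvG
    by_cases hk : k = "?" <;> simp [hk] <;> split_ifs <;> omega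
  rw [hstep, PySem.List.foldl_add]

-- scores agree
def pvT (dico : List (String × List (String × Int))) (c : Char) : Int :=
  match (PySem.Dict.ofList dico).get? (String.singleton c) with
  | some inner => (PySem.Dict.ofList inner).getD "val" 0
  | none => 0

lemma pvScoreStep (dico : List (String × List (String × Int))) :
    (fun (s : Int) (c : Char) =>
      match (PySem.Dict.ofList dico).get? (String.singleton c) with
      | some inner => s + (PySem.Dict.ofList inner).getD "val" 0
      | none => s)
    = fun (s : Int) (c : Char) => s + pvT dico c := by
  funext s c
  unfold pvT
  cases h : (PySem.Dict.ofList dico).get? (String.singleton c) <;> simp [h]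

lemma pvScore_eq (mot : String) (dico : List (String × List (String × Int))) :
    pvScore mot dico = valeur_mot mot dico := by
  simp only [pvScore, valeur_mot]
  rw [pvScoreStep, PySem.List.foldl_add, PySem.List.foldl_add]
  split_ifs <;> ring

-- A's candidate filter as a predicate
def pvP (ll : List String) (mot : String) : Bool :=
  decide (mot.toList.length ≤ ll.length) && mot_jouable mot ll

lemma mots_jouables_eq (motsfr ll : List String) :
    mots_jouables motsfr ll = motsfr.filter (pvP ll) := by
  unfold mots_jouables
  have hstep : (fun (playable : List String) (mot : String) =>
      if mot.toList.length ≤ ll.length then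
        (if mot_jouable mot ll then playable ++ [mot] else playable)
      else playable)
    = fun (playable : List String) (mot : String) =>
        if pvP ll mot then playable ++ [mot] else playable := by
    funext acc mot
    unfold pvP
    by_cases h1 : mot.toList.length ≤ ll.length <;> by_cases h2 : mot_jouable mot ll <;>
      simp [h1, h2]
  rw [hstep, PySem.List.foldl_append_if_eq_filter]
  simp

-- B's guard agrees with A's playability test
lemma pvPlayable_iff (ll : List String) (mot : String) :
    mot_jouable mot ll = true ↔
      ¬ pvDeficit (pvNeedOf mot.toList) (pvRackOf ll) > (pvRackOf ll).getD "?" 0 := by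
  rw [pvDeficit_eq, pvRackOf_eq, PySem.Dict.getD_counter]
  unfold mot_jouable
  rw [pvGo_eq_gdy]
  rw [pvGdy_iff (mot.toList.map String.singleton) ll
      (PySem.Set.ofList (mot.toList.map String.singleton))
      (PySem.Set.nodup_ofList _)
      (fun s hs _ => (PySem.Set.mem_ofList _ _).mpr hs)]
  omega

-- named step functions (definitionally the ports' loop bodies)
def pvStepA (dico : List (String × List (String × Int))) : String × Int → String → String × Int :=
  fun st mot =>
    let s := valeur_mot mot dico
    if s > st.2 then (mot, s) else st

def pvStepB (ll : List String) (dico : List (String × List (String × Int))) :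
    Option String × Int → String → Option String × Int :=
  fun st mot =>
    if mot.toList.length > ll.length then st
    else if pvDeficit (pvNeedOf mot.toList) (pvRackOf ll) > (pvRackOf ll).getD "?" 0 then st
    else
      let s := pvScore mot dico
      match st.1 with
      | none => (some mot, s)
      | some _ => if s > st.2 then (some mot, s) else st

lemma pvStepB_skip (ll : List String) (dico : List (String × List (String × Int)))
    (st : Option String × Int) (mot : String) (h : pvP ll mot = false) :
    pvStepB ll dico st mot = st := by
  unfold pvStepB
  by_cases hlen : mot.toList.length > ll.length
  · rw [if_pos hlen]
  · have hle : mot.toList.length ≤ ll.length := by omega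
    have hnj : mot_jouable mot ll = false := by
      unfold pvP at h
      have hle2 : mot.length ≤ ll.length := by simpa using hle
      simpa [hle2] using h
    have hdef : pvDeficit (pvNeedOf mot.toList) (pvRackOf ll) > (pvRackOf ll).getD "?" 0 := by
      by_contra hc
      rw [← pvPlayable_iff ll mot] at hc
      simp [hc] at hnj
    rw [if_neg hlen, if_pos hdef]

lemma pvStepB_play (ll : List String) (dico : List (String × List (String × Int)))
    (st : Option String × Int) (mot : String) (h : pvP ll mot = true) :
    pvStepB ll dico st mot =
      (let s := valeur_mot mot dico
       match st.1 with
       | none => (some mot, s)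
       | some _ => if s > st.2 then (some mot, s) else st) := by
  unfold pvP at h
  simp only [Bool.and_eq_true, decide_eq_true_eq] at h
  obtain ⟨hle, hj⟩ := h
  have hlen : ¬ mot.toList.length > ll.length := by omega
  have hdef : ¬ pvDeficit (pvNeedOf mot.toList) (pvRackOf ll) > (pvRackOf ll).getD "?" 0 :=
    (pvPlayable_iff ll mot).mp hj
  unfold pvStepB
  rw [if_neg hlen, if_neg hdef, pvScore_eq]

lemma pvLoopSome (ll : List String) (dico : List (String × List (String × Int))) :
    ∀ (l : List String) (b : String) (sb : Int),
      l.foldl (pvStepB ll dico) (some b, sb)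
        = (let q := (l.filter (pvP ll)).foldl (pvStepA dico) (b, sb); (some q.1, q.2)) := by
  intro l
  induction l with
  | nil => intro b sb; rfl
  | cons mot t ih =>
    intro b sb
    by_cases hp : pvP ll mot = true
    · simp only [List.foldl_cons, List.filter_cons, hp, if_true]
      rw [pvStepB_play ll dico (some b, sb) mot hp]
      simp only [pvStepA, List.foldl_cons]
      by_cases hgt : valeur_mot mot dico > sb
      · simp only [hgt, if_pos]
        simpa using ih mot (valeur_mot mot dico)
      · simp only [hgt]
        simpa [hgt] using ih b sb
    · have hp' : pvP ll mot = false := by simpa using hp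
      simp only [List.foldl_cons, List.filter_cons, hp', Bool.false_eq_true, if_false]
      rw [pvStepB_skip ll dico (some b, sb) mot hp']
      exact ih b sb

lemma pvLoopNone (ll : List String) (dico : List (String × List (String × Int))) :
    ∀ (l : List String),
      l.foldl (pvStepB ll dico) ((none : Option String), (0 : Int))
        = (match l.filter (pvP ll) with
           | [] => ((none : Option String), (0 : Int))
           | b :: rest =>
             (let q := rest.foldl (pvStepA dico) (b, valeur_mot b dico); (some q.1, q.2))) := by
  intro l
  induction l with
  | nil => rfl
  | cons mot t ih =>
    by_cases hp : pvP ll mot = true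
    · simp only [List.foldl_cons, List.filter_cons, hp, if_true]
      rw [pvStepB_play ll dico ((none : Option String), (0 : Int)) mot hp]
      simpa using pvLoopSome ll dico t mot (valeur_mot mot dico)
    · have hp' : pvP ll mot = false := by simpa using hp
      simp only [List.foldl_cons, List.filter_cons, hp', Bool.false_eq_true, if_false]
      rw [pvStepB_skip ll dico ((none : Option String), (0 : Int)) mot hp']
      exact ih

-- ===== VERDICT (by name: the statement is the Claim_ definition above) =====
theorem meilleur_mot_spec : Claim_equal_meilleur_mot := by
  unfold Claim_equal_meilleur_mot
  intro motsfr ll dico _ _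
  unfold Spec_meilleur_mot
  have hB : meilleur_mot_alt motsfr ll dico
      = (match (motsfr.foldl (pvStepB ll dico) ((none : Option String), (0 : Int))).1 with
         | none => ""
         | some b => b) := rfl
  have hA : meilleur_mot motsfr ll dico
      = (match mots_jouables motsfr ll with
         | [] => ""
         | b0 :: rest => (rest.foldl (pvStepA dico) (b0, valeur_mot b0 dico)).1) := rfl
  rw [hA, hB, pvLoopNone ll dico motsfr, mots_jouables_eq motsfr ll]
  cases hf : motsfr.filter (pvP ll) <;> simp
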